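-- pv_equiv track=rewrite | github.com/ccxxgao/Tour-Scheduler | scheduling.py | getAvailabilities
-- ===== SOURCE A (Python) =====
-- def getAvailabilities(string):
--     s = string.split(', ')
--     avail = [0,0,0,0,0]
--     for day in s:
--         if day == 'Monday': avail[0] = 1
--         elif day == 'Tuesday': avail[1] = 1
--         elif day == 'Wednesday': avail[2] = 1
--         elif day == 'Thursday': avail[3] = 1
--         elif day == 'Friday': avail[4] = 1
--     return avail
-- ===== SOURCE B (Python) =====
-- WEEKDAYS = ['Monday', 'Tuesday', 'Wednesday', 'Thursday', 'Friday']
--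
-- def getAvailabilities(string):
--     days = set(string.split(', '))
--     return [int(d in days) for d in WEEKDAYS]
-- ===== Notes on version B (the rewrite author's own statement) =====
-- stated objective: idiomatic
-- what changed: Instead of iterating the input tokens and dispatching through an if/elif chain that writes positional flags, B builds a set of the split tokens once and maps over the fixed ordered weekday list, emitting int(d in days) for each.
import Mathlib
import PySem

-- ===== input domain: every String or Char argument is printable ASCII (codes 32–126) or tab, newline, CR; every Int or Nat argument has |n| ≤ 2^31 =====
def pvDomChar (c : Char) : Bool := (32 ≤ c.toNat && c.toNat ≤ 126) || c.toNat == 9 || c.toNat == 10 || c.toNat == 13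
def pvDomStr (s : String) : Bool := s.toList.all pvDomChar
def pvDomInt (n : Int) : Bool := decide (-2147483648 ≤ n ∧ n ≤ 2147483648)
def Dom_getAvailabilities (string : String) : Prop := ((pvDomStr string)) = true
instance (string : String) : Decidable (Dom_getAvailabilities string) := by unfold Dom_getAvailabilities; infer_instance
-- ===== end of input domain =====

-- B replaces A's per-token if/elif chain writing positional flags by a set of the
-- split tokens plus a membership test over the fixed weekday list (idiomatic).

-- ===== PORT A =====
def pvStepA (avail : List Int) (day : String) : List Int :=
  if day = "Monday" then PySem.List.pySetD avail 0 1
  else if day = "Tuesday" then PySem.List.pySetD avail 1 1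
  else if day = "Wednesday" then PySem.List.pySetD avail 2 1
  else if day = "Thursday" then PySem.List.pySetD avail 3 1
  else if day = "Friday" then PySem.List.pySetD avail 4 1
  else avail

def getAvailabilities (string : String) : List Int :=
  let s := (PySem.Str.split? string ", ").getD []   -- sep ", " ≠ "", so split? is always some
  let avail : List Int := [0, 0, 0, 0, 0]
  s.foldl pvStepA avail

-- ===== PORT B =====
def pvWeekdays : List String := ["Monday", "Tuesday", "Wednesday", "Thursday", "Friday"]

def getAvailabilities_alt (string : String) : List Int :=
  let days : PySem.Set String := PySem.Set.ofList ((PySem.Str.split? string ", ").getD [])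
  pvWeekdays.map (fun d => if PySem.Set.contains days d then (1 : Int) else 0)

-- ===== PRECONDITION & SPEC =====
def Spec_getAvailabilities (string : String) (out : List Int) : Prop := out = getAvailabilities_alt string
instance (string : String) (out : List Int) : Decidable (Spec_getAvailabilities string out) := by unfold Spec_getAvailabilities; infer_instance

-- ===== CLAIM (what is proved, stated in full; the proofs are below) =====
def Claim_equal_getAvailabilities : Prop := ∀ (string : String), Dom_getAvailabilities string → Spec_getAvailabilities string (getAvailabilities string)

-- ===== LEMMAS AND PROOFS =====

-- One step of A's loop, written out pointwise on the five flags.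
theorem pvStepA_eval (d : String) (a0 a1 a2 a3 a4 : Int) :
    pvStepA [a0, a1, a2, a3, a4] d =
      [if d = "Monday" then 1 else a0,
       if d = "Tuesday" then 1 else a1,
       if d = "Wednesday" then 1 else a2,
       if d = "Thursday" then 1 else a3,
       if d = "Friday" then 1 else a4] := by
  have e0 : PySem.List.pySetD [a0, a1, a2, a3, a4] 0 1 = [1, a1, a2, a3, a4] := by
    rw [PySem.List.pySetD_of_nonneg (i := 0) _ _ (by norm_num)]; rfl
  have e1 : PySem.List.pySetD [a0, a1, a2, a3, a4] 1 1 = [a0, 1, a2, a3, a4] := by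
    rw [PySem.List.pySetD_of_nonneg (i := 1) _ _ (by norm_num)]; rfl
  have e2 : PySem.List.pySetD [a0, a1, a2, a3, a4] 2 1 = [a0, a1, 1, a3, a4] := by
    rw [PySem.List.pySetD_of_nonneg (i := 2) _ _ (by norm_num)]; rfl
  have e3 : PySem.List.pySetD [a0, a1, a2, a3, a4] 3 1 = [a0, a1, a2, 1, a4] := by
    rw [PySem.List.pySetD_of_nonneg (i := 3) _ _ (by norm_num)]; rfl
  have e4 : PySem.List.pySetD [a0, a1, a2, a3, a4] 4 1 = [a0, a1, a2, a3, 1] := by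
    rw [PySem.List.pySetD_of_nonneg (i := 4) _ _ (by norm_num)]; rfl
  unfold pvStepA
  split_ifs <;> simp_all

-- A's fold sets flag i to 1 exactly when the corresponding weekday occurs in l.
theorem pvFoldA_char (l : List String) (a0 a1 a2 a3 a4 : Int) :
    l.foldl pvStepA [a0, a1, a2, a3, a4] =
    [if "Monday" ∈ l then 1 else a0,
     if "Tuesday" ∈ l then 1 else a1,
     if "Wednesday" ∈ l then 1 else a2,
     if "Thursday" ∈ l then 1 else a3,
     if "Friday" ∈ l then 1 else a4] := by
  induction l generalizing a0 a1 a2 a3 a4 with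
  | nil => simp
  | cons d t ih =>
    rw [List.foldl_cons, pvStepA_eval, ih]
    refine List.ext_getElem (by simp) ?_
    intro i hi _
    simp only [List.length_cons, List.length_nil] at hi
    interval_cases i <;>
      · simp only [List.getElem_cons_zero, List.getElem_cons_succ, List.mem_cons]
        split_ifs <;> simp_all [eq_comm]

-- Membership in set(l) agrees with list membership.
theorem pvContainsFlag (l : List String) (d : String) :
    (if d ∈ l then (1 : Int) else 0)
      = if PySem.Set.contains (PySem.Set.ofList l) d then 1 else 0 := by
  by_cases h : d ∈ l <;>
    simp_all [PySem.Set.contains, PySem.Set.mem_ofList]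

theorem getAvailabilities_eq_alt (string : String) :
    getAvailabilities string = getAvailabilities_alt string := by
  unfold getAvailabilities getAvailabilities_alt pvWeekdays
  rw [pvFoldA_char]
  simp only [List.map_cons, List.map_nil]
  refine List.ext_getElem (by simp) ?_
  intro i hi _
  simp only [List.length_cons, List.length_nil] at hi
  interval_cases i <;>
    · simp only [List.getElem_cons_zero, List.getElem_cons_succ]
      exact pvContainsFlag _ _

-- ===== VERDICT (by name: the statement is the Claim_ definition above) =====
theorem getAvailabilities_spec : Claim_equal_getAvailabilities := by
  intro string _
  exact getAvailabilities_eq_alt string
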